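-- pv_equiv track=rewrite | github.com/GitGurls/title---checker | backend/api/simulate.py | _assess_anomaly_severity
-- ===== SOURCE A (Python) =====
-- from typing import Optional, List, Dict
--
-- def _assess_anomaly_severity(anomalies: List[Dict[str, str]]) -> str:
--     """Assess overall severity of detected anomalies"""
--     if not anomalies:
--         return "NONE"
--
--     severities = [a["severity"] for a in anomalies]
--
--     if "CRITICAL" in severities:
--         return "CRITICAL"
--     elif "HIGH" in severities:
--         return "HIGH"
--     elif "MEDIUM" in severities:
--         return "MEDIUM"
--     else:
--         return "LOW"
-- ===== SOURCE B (Python) =====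
-- def _assess_anomaly_severity(anomalies):
--     """Assess overall severity of detected anomalies"""
--     if not anomalies:
--         return "NONE"
--     rank = {"CRITICAL": 3, "HIGH": 2, "MEDIUM": 1}
--     best = 0
--     for a in anomalies:
--         best = max(best, rank.get(a["severity"], 0))
--     return {3: "CRITICAL", 2: "HIGH", 1: "MEDIUM"}.get(best, "LOW")
-- ===== Notes on version B (the rewrite author's own statement) =====
-- stated objective: simpler
-- what changed: Replaces the intermediate severities list and the three-step membership chain by a single pass that keeps a running maximum severity rank, mapped back to its name at the end.
import Mathlib
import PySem

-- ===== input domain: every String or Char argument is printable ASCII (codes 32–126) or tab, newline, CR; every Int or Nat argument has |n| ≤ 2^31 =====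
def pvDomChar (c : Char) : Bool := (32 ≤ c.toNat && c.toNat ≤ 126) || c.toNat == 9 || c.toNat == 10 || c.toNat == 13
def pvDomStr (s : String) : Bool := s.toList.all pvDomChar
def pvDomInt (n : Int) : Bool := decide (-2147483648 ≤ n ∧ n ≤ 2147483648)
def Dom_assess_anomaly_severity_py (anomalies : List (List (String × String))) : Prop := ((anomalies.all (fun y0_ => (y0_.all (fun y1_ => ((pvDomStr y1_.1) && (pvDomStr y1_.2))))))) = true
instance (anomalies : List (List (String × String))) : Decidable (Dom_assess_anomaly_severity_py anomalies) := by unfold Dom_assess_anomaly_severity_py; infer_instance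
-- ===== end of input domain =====

-- B replaces A's intermediate severities list and three membership scans by one pass keeping a running max rank (objective: simpler).


-- ===== PORT A =====
-- a["severity"]: first-match lookup; Pre_ guarantees the key exists, so the getD default is never reached inside Pre_.
def pvSevOf (a : List (String × String)) : String :=
  ((a.find? (fun p => p.1 == "severity")).map Prod.snd).getD ""

def assess_anomaly_severity_py (anomalies : List (List (String × String))) : String :=
  if anomalies.isEmpty then "NONE"
  else
    let severities := anomalies.map pvSevOf
    if severities.contains "CRITICAL" then "CRITICAL"
    else if severities.contains "HIGH" then "HIGH"
    else if severities.contains "MEDIUM" then "MEDIUM"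
    else "LOW"

-- ===== PORT B =====
-- {"CRITICAL":3,"HIGH":2,"MEDIUM":1}.get(s, 0) on the literal dict
def pvSevRank (s : String) : Nat :=
  if s = "CRITICAL" then 3 else if s = "HIGH" then 2 else if s = "MEDIUM" then 1 else 0

-- {3:"CRITICAL",2:"HIGH",1:"MEDIUM"}.get(n, "LOW") on the literal dict
def pvRankName (n : Nat) : String :=
  if n = 3 then "CRITICAL" else if n = 2 then "HIGH" else if n = 1 then "MEDIUM" else "LOW"

def assess_anomaly_severity_py_alt (anomalies : List (List (String × String))) : String :=
  match anomalies with
  | [] => "NONE"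
  | _ => pvRankName (anomalies.foldl
      (fun best a =>
        max best (pvSevRank (((a.find? (fun p => p.1 == "severity")).map Prod.snd).getD ""))) 0)

-- ===== PRECONDITION & SPEC =====
-- Pre_ excludes exactly the inputs where some anomaly dict lacks the "severity" key: there Python A raises KeyError.
def Pre_assess_anomaly_severity_py (anomalies : List (List (String × String))) : Prop :=
  ∀ a ∈ anomalies, "severity" ∈ a.map Prod.fst
instance (anomalies : List (List (String × String))) : Decidable (Pre_assess_anomaly_severity_py anomalies) := by unfold Pre_assess_anomaly_severity_py; infer_instance
def pvWitness_assess_anomaly_severity_py : (List (List (String × String))) := [[("severity", "HIGH")], [("severity", "LOW")]]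

def Spec_assess_anomaly_severity_py (anomalies : List (List (String × String))) (out : String) : Prop := out = assess_anomaly_severity_py_alt anomalies
instance (anomalies : List (List (String × String))) (out : String) : Decidable (Spec_assess_anomaly_severity_py anomalies out) := by unfold Spec_assess_anomaly_severity_py; infer_instance

-- ===== CLAIM (what is proved, stated in full; the proofs are below) =====
def Claim_equal_assess_anomaly_severity_py : Prop := ∀ (anomalies : List (List (String × String))), Dom_assess_anomaly_severity_py anomalies → Pre_assess_anomaly_severity_py anomalies → Spec_assess_anomaly_severity_py anomalies (assess_anomaly_severity_py anomalies)

-- ===== LEMMAS AND PROOFS =====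

-- maximum rank of a list of severity strings, recursively
def pvLMax : List String → Nat
  | [] => 0
  | x :: t => max (pvSevRank x) (pvLMax t)

lemma pvLMax_le (s : List String) : pvLMax s ≤ 3 := by
  induction s with
  | nil => simp [pvLMax]
  | cons x t ih =>
    have : pvSevRank x ≤ 3 := by unfold pvSevRank; split_ifs <;> omega
    simp [pvLMax]; omega

lemma pvLMax_eq3 (s : List String) : pvLMax s = 3 ↔ "CRITICAL" ∈ s := by
  induction s with
  | nil => simp [pvLMax]
  | cons x t ih =>
    have hb := pvLMax_le t
    simp only [pvLMax, List.mem_cons]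
    by_cases h1 : x = "CRITICAL" <;> by_cases h2 : x = "HIGH" <;> by_cases h3 : x = "MEDIUM" <;>
      by_cases m1 : "CRITICAL" ∈ t <;>
      simp_all [pvSevRank, eq_comm] <;> omega

lemma pvLMax_ge2 (s : List String) : 2 ≤ pvLMax s ↔ "CRITICAL" ∈ s ∨ "HIGH" ∈ s := by
  induction s with
  | nil => simp [pvLMax]
  | cons x t ih =>
    have hb := pvLMax_le t
    simp only [pvLMax, List.mem_cons]
    by_cases h1 : x = "CRITICAL" <;> by_cases h2 : x = "HIGH" <;> by_cases h3 : x = "MEDIUM" <;>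
      by_cases m1 : "CRITICAL" ∈ t <;> by_cases m2 : "HIGH" ∈ t <;>
      simp_all [pvSevRank, eq_comm] <;> omega

lemma pvLMax_ge1 (s : List String) :
    1 ≤ pvLMax s ↔ "CRITICAL" ∈ s ∨ "HIGH" ∈ s ∨ "MEDIUM" ∈ s := by
  induction s with
  | nil => simp [pvLMax]
  | cons x t ih =>
    have hb := pvLMax_le t
    simp only [pvLMax, List.mem_cons]
    by_cases h1 : x = "CRITICAL" <;> by_cases h2 : x = "HIGH" <;> by_cases h3 : x = "MEDIUM" <;>
      by_cases m1 : "CRITICAL" ∈ t <;> by_cases m2 : "HIGH" ∈ t <;> by_cases m3 : "MEDIUM" ∈ t <;>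
      simp_all [pvSevRank, eq_comm] <;> omega

lemma pvFoldl_lmax (s : List String) (acc : Nat) :
    s.foldl (fun best x => max best (pvSevRank x)) acc = max acc (pvLMax s) := by
  induction s generalizing acc with
  | nil => simp [pvLMax]
  | cons x t ih => simp [pvLMax, List.foldl_cons, ih, Nat.max_assoc]

lemma pvMain (s : List String) :
    (if s.contains "CRITICAL" then "CRITICAL"
     else if s.contains "HIGH" then "HIGH"
     else if s.contains "MEDIUM" then "MEDIUM" else "LOW")
      = pvRankName (s.foldl (fun best x => max best (pvSevRank x)) 0) := by
  rw [pvFoldl_lmax, Nat.max_eq_right (Nat.zero_le _)]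
  have hb := pvLMax_le s
  by_cases hc : "CRITICAL" ∈ s
  · have h3 := (pvLMax_eq3 s).2 hc
    simp [hc, h3, pvRankName]
  · by_cases hh : "HIGH" ∈ s
    · have h2 : pvLMax s = 2 := by
        have hge := (pvLMax_ge2 s).2 (Or.inr hh)
        have hne : pvLMax s ≠ 3 := fun h => hc ((pvLMax_eq3 s).1 h)
        omega
      simp [hc, hh, h2, pvRankName]
    · by_cases hm : "MEDIUM" ∈ s
      · have h1 : pvLMax s = 1 := by
          have hge := (pvLMax_ge1 s).2 (Or.inr (Or.inr hm))
          have hne2 : ¬ (2 ≤ pvLMax s) := fun h => by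
            rcases (pvLMax_ge2 s).1 h with h' | h' <;> [exact hc h'; exact hh h']
          omega
        simp [hc, hh, hm, h1, pvRankName]
      · have h0 : pvLMax s = 0 := by
          have hne1 : ¬ (1 ≤ pvLMax s) := fun h => by
            rcases (pvLMax_ge1 s).1 h with h' | h' | h' <;>
              [exact hc h'; exact hh h'; exact hm h']
          omega
        simp [hc, hh, hm, h0, pvRankName]

-- ===== VERDICT (by name: the statement is the Claim_ definition above) =====
theorem assess_anomaly_severity_py_spec : Claim_equal_assess_anomaly_severity_py := by
  intro anomalies _ _
  unfold Spec_assess_anomaly_severity_py assess_anomaly_severity_py assess_anomaly_severity_py_alt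
  cases anomalies with
  | nil => rfl
  | cons a t =>
    show (if ((a :: t).map pvSevOf).contains "CRITICAL" then "CRITICAL"
      else if ((a :: t).map pvSevOf).contains "HIGH" then "HIGH"
      else if ((a :: t).map pvSevOf).contains "MEDIUM" then "MEDIUM" else "LOW")
      = pvRankName ((a :: t).foldl (fun best x => max best (pvSevRank (pvSevOf x))) 0)
    rw [← List.foldl_map (f := pvSevOf) (g := fun best x => max best (pvSevRank x))]
    exact pvMain ((a :: t).map pvSevOf)
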